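-- pv_equiv track=rewrite | github.com/SakpalAkshay/recursionPython | replacePI..py | replacePi
-- ===== SOURCE A (Python) =====
-- def replacePi(s):
--     #base case
--     if len(s)==0 or len(s)==1:
--         return s
--
--     if (s[0]=='p' and s[1]=='i'):
--         smallOutput = replacePi(s[2:])
--         return '3.14' + smallOutput
--     else:
--         return s[0] + replacePi(s[1:])
-- ===== SOURCE B (Python) =====
-- def replacePi(s):
--     out = []
--     i = 0
--     n = len(s)
--     while i < n:
--         if s[i] == 'p' and i + 1 < n and s[i + 1] == 'i':
--             out.append('3.14')
--             i += 2
--         else: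
--             out.append(s[i])
--             i += 1
--     return ''.join(out)
-- ===== Notes on version B (the rewrite author's own statement) =====
-- stated objective: faster
-- what changed: Replaced the O(n^2) recursion with repeated string slicing/concatenation by a single iterative left-to-right scan accumulating chunks and joining once.
import Mathlib
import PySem

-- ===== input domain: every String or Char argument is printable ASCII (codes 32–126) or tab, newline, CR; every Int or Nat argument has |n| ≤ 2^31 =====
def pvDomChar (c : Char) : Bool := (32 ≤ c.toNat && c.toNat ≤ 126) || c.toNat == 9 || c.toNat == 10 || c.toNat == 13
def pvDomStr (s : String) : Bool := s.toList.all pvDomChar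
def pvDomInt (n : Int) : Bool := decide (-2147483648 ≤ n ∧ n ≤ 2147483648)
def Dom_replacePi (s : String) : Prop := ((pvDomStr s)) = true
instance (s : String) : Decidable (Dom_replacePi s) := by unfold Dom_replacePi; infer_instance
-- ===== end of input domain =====

-- B replaces A's O(n^2) recursion (string slicing + concatenation at every step) by a
-- single iterative left-to-right scan that accumulates chunks and joins them once.


-- ===== PORT A =====
-- literal recursion of A over the character list (s[2:] / s[1:] = list tails)
def replacePiRec : List Char → List Char
  | [] => []
  | [c] => [c]
  | c1 :: c2 :: rest =>
    if c1 = 'p' ∧ c2 = 'i' then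
      ('3' :: '.' :: '1' :: '4' :: []) ++ replacePiRec rest
    else
      c1 :: replacePiRec (c2 :: rest)

def replacePi (s : String) : String := String.ofList (replacePiRec s.toList)

-- ===== PORT B =====
-- B's while-loop: accumulator of chunks (kept reversed), joined once at the end
def replacePiLoop : List Char → List (List Char) → List (List Char)
  | [], acc => acc
  | c :: rest, acc =>
    if c = 'p' then
      match rest with
      | c2 :: rest2 =>
        if c2 = 'i' then replacePiLoop rest2 (('3' :: '.' :: '1' :: '4' :: []) :: acc)
        else replacePiLoop (c2 :: rest2) ([c] :: acc)
      | [] => replacePiLoop [] ([c] :: acc)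
    else
      replacePiLoop rest ([c] :: acc)
termination_by cs _ => cs.length
decreasing_by all_goals (simp; try omega)

def replacePi_alt (s : String) : String :=
  String.ofList ((replacePiLoop s.toList []).reverse.flatten)

-- ===== PRECONDITION & SPEC =====
def Spec_replacePi (s : String) (out : String) : Prop := out = replacePi_alt s
instance (s : String) (out : String) : Decidable (Spec_replacePi s out) := by unfold Spec_replacePi; infer_instance

-- ===== CLAIM (what is proved, stated in full; the proofs are below) =====
def Claim_equal_replacePi : Prop := ∀ (s : String), Dom_replacePi s → Spec_replacePi s (replacePi s)

-- ===== LEMMAS AND PROOFS =====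
theorem replacePiLoop_eq (cs : List Char) (acc : List (List Char)) :
    (replacePiLoop cs acc).reverse.flatten = acc.reverse.flatten ++ replacePiRec cs := by
  induction cs, acc using replacePiLoop.induct with
  | case1 acc => simp [replacePiLoop, replacePiRec]
  | case2 acc rest2 ih =>
    simp only [replacePiLoop, if_true]
    rw [ih]
    simp [replacePiRec]
  | case3 acc c2 rest2 hi ih =>
    simp only [replacePiLoop, if_true, if_neg hi]
    rw [ih]
    simp [replacePiRec, hi]
  | case4 acc ih =>
    rw [replacePiLoop.eq_def]
    simp [replacePiLoop, replacePiRec]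
  | case5 c rest acc hc ih =>
    rw [replacePiLoop.eq_def]
    simp only [if_neg hc]
    rw [ih]
    cases rest with
    | nil => simp [replacePiRec]
    | cons c2 rest2 =>
      have : ¬ (c = 'p' ∧ c2 = 'i') := fun h => hc h.1
      simp [replacePiRec, this]

-- ===== VERDICT (by name: the statement is the Claim_ definition above) =====
theorem replacePi_spec : Claim_equal_replacePi := by
  intro s _
  unfold Spec_replacePi replacePi replacePi_alt
  rw [replacePiLoop_eq]
  simp
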